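-- pv_equiv track=rewrite | github.com/ComaVN/adventofcode-2024 | day05/part2.py | verify_order
-- ===== SOURCE A (Python) =====
-- def verify_order(ordering_rules, pages):
--     for idx, page in enumerate(pages):
--         for other_page in pages[:idx]:
--             page_tup = (other_page, page)
--             if page_tup in ordering_rules:
--                 if not ordering_rules[page_tup]:
--                     return False
--         for other_page in pages[idx + 1 :]:
--             page_tup = (page, other_page)
--             if page_tup in ordering_rules:
--                 if not ordering_rules[page_tup]:
--                     return False
--     return True
-- ===== SOURCE B (Python) =====
-- def verify_order(ordering_rules, pages):
--     # Single pass over the rules instead of scanning all page pairs: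
--     # a falsy rule (a, b) is violated iff some occurrence of a precedes
--     # some occurrence of b, i.e. first index of a < last index of b.
--     n = len(pages)
--     rev = pages[::-1]
--     for (a, b), ok in ordering_rules.items():
--         if not ok and a in pages and b in pages:
--             if pages.index(a) < n - 1 - rev.index(b):
--                 return False
--     return True
-- ===== Notes on version B (the rewrite author's own statement) =====
-- stated objective: faster
-- what changed: B replaces A's scan over all O(n^2) ordered page pairs (each with a dict lookup) by a single pass over the rules, checking each falsy rule (a,b) against the first occurrence index of a and the last occurrence index of b; the Lean Pre_ only excludes association lists with duplicate rule keys, which cannot arise from a Python dict.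
import Mathlib
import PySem

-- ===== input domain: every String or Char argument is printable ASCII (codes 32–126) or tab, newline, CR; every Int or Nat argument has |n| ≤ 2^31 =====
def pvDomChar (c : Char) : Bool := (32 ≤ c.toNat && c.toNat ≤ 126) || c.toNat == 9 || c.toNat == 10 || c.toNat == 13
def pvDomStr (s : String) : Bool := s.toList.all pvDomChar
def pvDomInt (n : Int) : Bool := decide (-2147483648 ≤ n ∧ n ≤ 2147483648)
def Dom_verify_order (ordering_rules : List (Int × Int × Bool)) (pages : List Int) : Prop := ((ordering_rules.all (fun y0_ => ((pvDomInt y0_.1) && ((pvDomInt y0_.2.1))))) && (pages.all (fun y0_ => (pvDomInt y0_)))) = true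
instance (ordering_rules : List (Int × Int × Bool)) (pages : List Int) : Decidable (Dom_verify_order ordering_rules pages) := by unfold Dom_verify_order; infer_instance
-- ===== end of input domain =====

-- B replaces A's scan over all ordered page pairs by one pass over the rules,
-- checking each falsy rule against the first index of its left page and the
-- last index of its right page (objective: faster on pair-heavy inputs).


-- ===== PORT A =====
-- dict lookup on key (a, b): first matching entry of the association list
def ruleGet? (rules : List (Int × Int × Bool)) (a b : Int) : Option Bool :=
  match rules with
  | [] => none
  | (x, y, v) :: rest => if x = a ∧ y = b then some v else ruleGet? rest a b

-- first inner loop: 'for other_page in pages[:idx]: tup=(other_page,page); if in: if not val: return False'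
def pvA_check1 (rules : List (Int × Int × Bool)) (page : Int) : List Int → Bool
  | [] => true
  | o :: rest =>
    match ruleGet? rules o page with
    | some v => if !v then false else pvA_check1 rules page rest
    | none => pvA_check1 rules page rest

-- second inner loop: tup = (page, other_page)
def pvA_check2 (rules : List (Int × Int × Bool)) (page : Int) : List Int → Bool
  | [] => true
  | o :: rest =>
    match ruleGet? rules page o with
    | some v => if !v then false else pvA_check2 rules page rest
    | none => pvA_check2 rules page rest

-- 'for idx, page in enumerate(pages)': structural recursion over the suffix, idx carried along;
-- pages[:idx] = take idx, pages[idx+1:] = drop (idx+1) (exact: idx ≥ 0)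
def pvA_loop (rules : List (Int × Int × Bool)) (pages : List Int) : Nat → List Int → Bool
  | _, [] => true
  | idx, page :: rest =>
    if pvA_check1 rules page (pages.take idx) then
      if pvA_check2 rules page (pages.drop (idx + 1)) then
        pvA_loop rules pages (idx + 1) rest
      else false
    else false

def verify_order (ordering_rules : List (Int × Int × Bool)) (pages : List Int) : Bool :=
  pvA_loop ordering_rules pages 0 pages

-- ===== PORT B =====
-- 'for (a, b), ok in ordering_rules.items(): if not ok and a in pages and b in pages:
--    if pages.index(a) < n - 1 - rev.index(b): return False'
def pvB_loop (pages rev : List Int) (n : Int) : List (Int × Int × Bool) → Bool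
  | [] => true
  | (a, b, ok) :: rest =>
    if !ok && pages.contains a && pages.contains b then
      match PySem.List.index? pages a, PySem.List.index? rev b with
      | some ia, some jb =>
        if (ia : Int) < n - 1 - (jb : Int) then false else pvB_loop pages rev n rest
      | _, _ => pvB_loop pages rev n rest   -- unreachable: both pages contain the keys
    else pvB_loop pages rev n rest

def verify_order_alt (ordering_rules : List (Int × Int × Bool)) (pages : List Int) : Bool :=
  pvB_loop pages pages.reverse (pages.length : Int) ordering_rules

-- ===== PRECONDITION & SPEC =====
-- Pre_ excludes association lists with duplicate rule keys: a Python dict always has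
-- distinct keys, so such lists do not arise from any Python input; on them A's
-- first-match lookup and B's pass over all entries legitimately differ.
def Pre_verify_order (ordering_rules : List (Int × Int × Bool)) (pages : List Int) : Prop :=
  (ordering_rules.map (fun r => (r.1, r.2.1))).Nodup

instance (ordering_rules : List (Int × Int × Bool)) (pages : List Int) : Decidable (Pre_verify_order ordering_rules pages) := by unfold Pre_verify_order; infer_instance

def pvWitness_verify_order : (List (Int × Int × Bool)) × List Int :=
  ([(1, 2, false), (2, 3, true)], [2, 1, 3])

def Spec_verify_order (ordering_rules : List (Int × Int × Bool)) (pages : List Int) (out : Bool) : Prop := out = verify_order_alt ordering_rules pages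
instance (ordering_rules : List (Int × Int × Bool)) (pages : List Int) (out : Bool) : Decidable (Spec_verify_order ordering_rules pages out) := by unfold Spec_verify_order; infer_instance

-- ===== CLAIM (what is proved, stated in full; the proofs are below) =====
def Claim_equal_verify_order : Prop := ∀ (ordering_rules : List (Int × Int × Bool)) (pages : List Int), Dom_verify_order ordering_rules pages → Pre_verify_order ordering_rules pages → Spec_verify_order ordering_rules pages (verify_order ordering_rules pages)

-- ===== LEMMAS AND PROOFS =====

-- there is an ordered occurrence pair governed by a falsy rule
def pvBad (rules : List (Int × Int × Bool)) (pages : List Int) : Prop :=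
  ∃ (i j : Nat) (a b : Int), i < j ∧ pages[i]? = some a ∧ pages[j]? = some b ∧ ruleGet? rules a b = some false

theorem ruleGet?_mem {rules : List (Int × Int × Bool)} {a b : Int} {v : Bool}
    (h : ruleGet? rules a b = some v) : (a, b, v) ∈ rules := by
  induction rules with
  | nil => simp [ruleGet?] at h
  | cons e rest ih =>
    obtain ⟨x, y, w⟩ := e
    simp only [ruleGet?] at h
    split at h
    · next hx => obtain ⟨rfl, rfl⟩ := hx; cases h; simp
    · exact List.mem_cons_of_mem _ (ih h)

theorem mem_ruleGet? {rules : List (Int × Int × Bool)} {a b : Int} {v : Bool}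
    (hn : (rules.map (fun r => (r.1, r.2.1))).Nodup)
    (h : (a, b, v) ∈ rules) : ruleGet? rules a b = some v := by
  induction rules with
  | nil => simp at h
  | cons e rest ih =>
    obtain ⟨x, y, w⟩ := e
    simp only [List.map_cons, List.nodup_cons] at hn
    rcases List.mem_cons.mp h with h1 | h1
    · cases h1; simp [ruleGet?]
    · simp only [ruleGet?]
      split
      · next hx =>
        obtain ⟨rfl, rfl⟩ := hx
        exact absurd (List.mem_map.mpr ⟨_, h1, rfl⟩) hn.1
      · exact ih hn.2 h1

theorem check1_true_iff (rules : List (Int × Int × Bool)) (page : Int) (l : List Int) :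
    pvA_check1 rules page l = true ↔ ∀ o ∈ l, ruleGet? rules o page ≠ some false := by
  induction l with
  | nil => simp [pvA_check1]
  | cons o rest ih =>
    simp only [pvA_check1]
    cases hg : ruleGet? rules o page with
    | none => simp [ih, hg]
    | some v =>
      cases v with
      | false => simp [hg]
      | true => simp [ih, hg]

theorem check2_true_iff (rules : List (Int × Int × Bool)) (page : Int) (l : List Int) :
    pvA_check2 rules page l = true ↔ ∀ o ∈ l, ruleGet? rules page o ≠ some false := by
  induction l with
  | nil => simp [pvA_check2]
  | cons o rest ih =>
    simp only [pvA_check2]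
    cases hg : ruleGet? rules page o with
    | none => simp [ih, hg]
    | some v =>
      cases v with
      | false => simp [hg]
      | true => simp [ih, hg]

theorem loopA_false_iff (rules : List (Int × Int × Bool)) (pages : List Int) :
    ∀ (rest : List Int) (idx : Nat), rest = pages.drop idx →
      (pvA_loop rules pages idx rest = false ↔
        ∃ (i j : Nat) (a b : Int), i < j ∧ idx ≤ j ∧ pages[i]? = some a ∧ pages[j]? = some b ∧
          ruleGet? rules a b = some false) := by
  intro rest
  induction rest with
  | nil =>
    intro idx hd
    have hlen : pages.length ≤ idx := by
      have := congrArg List.length hd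
      simp [List.length_drop] at this
      omega
    simp only [pvA_loop]
    constructor
    · intro h; cases h
    · rintro ⟨i, j, a, b, hij, hidx, ha, hb, hr⟩
      have : j < pages.length := by
        by_contra hc
        rw [List.getElem?_eq_none (by omega)] at hb
        cases hb
      omega
  | cons page rest' ih =>
    intro idx hd
    have hpage : pages[idx]? = some page := by
      have h0 : (pages.drop idx)[0]? = some page := by rw [← hd]; rfl
      simpa using h0
    have hidxlt : idx < pages.length := by
      rw [List.getElem?_eq_some_iff] at hpage
      exact hpage.1
    have hrest' : rest' = pages.drop (idx + 1) := by
      have : (pages.drop idx).tail = pages.drop (idx + 1) := by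
        rw [List.tail_drop]
      rw [← hd] at this
      simp only [List.tail_cons] at this
      exact this
    simp only [pvA_loop]
    by_cases hc1 : pvA_check1 rules page (pages.take idx) = true
    · by_cases hc2 : pvA_check2 rules page (pages.drop (idx + 1)) = true
      · rw [hc1, hc2]
        simp only [if_true]
        rw [ih (idx + 1) hrest']
        constructor
        · rintro ⟨i, j, a, b, hij, hj, ha, hb, hr⟩
          exact ⟨i, j, a, b, hij, by omega, ha, hb, hr⟩
        · rintro ⟨i, j, a, b, hij, hj, ha, hb, hr⟩
          rcases Nat.lt_or_ge j (idx + 1) with hj2 | hj2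
          · -- then j = idx, contradiction with hc1
            have hjidx : j = idx := by omega
            subst hjidx
            rw [hpage] at hb
            cases hb
            rw [check1_true_iff] at hc1
            have hmem : a ∈ pages.take j := by
              rw [List.getElem?_eq_some_iff] at ha
              obtain ⟨hi, rfl⟩ := ha
              rw [List.mem_take_iff_getElem]
              exact ⟨i, by omega, rfl⟩
            exact absurd hr (hc1 _ hmem)
          · exact ⟨i, j, a, b, hij, hj2, ha, hb, hr⟩
      · rw [hc1]
        simp only [if_true]
        rw [Bool.not_eq_true] at hc2
        rw [hc2]
        simp only [Bool.false_eq_true, if_false]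
        constructor
        · intro _
          have : ¬ ∀ o ∈ pages.drop (idx + 1), ruleGet? rules page o ≠ some false := by
            rw [← check2_true_iff]; simp [hc2]
          push_neg at this
          obtain ⟨o, ho, hr⟩ := this
          rw [List.mem_iff_getElem] at ho
          obtain ⟨m, hm, hom⟩ := ho
          rw [List.getElem_drop] at hom
          refine ⟨idx, idx + 1 + m, page, o, by omega, by omega, hpage, ?_, hr⟩
          rw [List.getElem?_eq_some_iff]
          have hlen : idx + 1 + m < pages.length := by
            rw [List.length_drop] at hm; omega
          exact ⟨hlen, hom⟩
        · intro _; simp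
    · rw [Bool.not_eq_true] at hc1
      rw [hc1]
      simp only [Bool.false_eq_true, if_false]
      constructor
      · intro _
        have : ¬ ∀ o ∈ pages.take idx, ruleGet? rules o page ≠ some false := by
          rw [← check1_true_iff]; simp [hc1]
        push_neg at this
        obtain ⟨o, ho, hr⟩ := this
        rw [List.mem_take_iff_getElem] at ho
        obtain ⟨k, hk, hok⟩ := ho
        refine ⟨k, idx, o, page, by omega, le_refl _, ?_, hpage, hr⟩
        rw [List.getElem?_eq_some_iff]
        exact ⟨by omega, hok⟩
      · intro _; simp

theorem A_false_iff (rules : List (Int × Int × Bool)) (pages : List Int) :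
    verify_order rules pages = false ↔ pvBad rules pages := by
  unfold verify_order pvBad
  rw [loopA_false_iff rules pages pages 0 (by simp)]
  constructor
  · rintro ⟨i, j, a, b, hij, _, ha, hb, hr⟩; exact ⟨i, j, a, b, hij, ha, hb, hr⟩
  · rintro ⟨i, j, a, b, hij, ha, hb, hr⟩; exact ⟨i, j, a, b, hij, Nat.zero_le _, ha, hb, hr⟩

theorem loopB_false_iff (pages rev : List Int) (n : Int) (rules : List (Int × Int × Bool)) :
    pvB_loop pages rev n rules = false ↔
      ∃ a b, (a, b, false) ∈ rules ∧ b ∈ pages ∧ ∃ ia jb,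
        PySem.List.index? pages a = some ia ∧ PySem.List.index? rev b = some jb ∧
        (ia : Int) < n - 1 - (jb : Int) := by
  induction rules with
  | nil => simp [pvB_loop]
  | cons e rest ih =>
    obtain ⟨a, b, ok⟩ := e
    simp only [pvB_loop]
    cases ok with
    | true =>
      simp only [Bool.not_true, Bool.false_and, Bool.false_eq_true, if_false]
      rw [ih]
      constructor
      · rintro ⟨a', b', hm, h⟩
        exact ⟨a', b', List.mem_cons_of_mem _ hm, h⟩
      · rintro ⟨a', b', hm, h⟩
        rcases List.mem_cons.mp hm with he | hm'
        · cases he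
        · exact ⟨a', b', hm', h⟩
    | false =>
      simp only [Bool.not_false, Bool.true_and]
      by_cases hca : a ∈ pages
      · by_cases hcb : b ∈ pages
        · have hcond : (pages.contains a && pages.contains b) = true := by
            simp [List.contains_iff_mem, hca, hcb]
          rw [hcond, if_pos rfl]
          obtain ⟨ia, hia⟩ := Option.isSome_iff_exists.mp
            ((PySem.List.index?_isSome_iff pages a).mpr hca)
          cases hjbo : PySem.List.index? rev b with
          | none =>
            rw [hia]
            dsimp only
            rw [ih]
            constructor
            · rintro ⟨a', b', hm, h⟩
              exact ⟨a', b', List.mem_cons_of_mem _ hm, h⟩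
            · rintro ⟨a', b', hm, hb', ia', jb', hia', hjb', hlt'⟩
              rcases List.mem_cons.mp hm with he | hm'
              · injection he with h1 h2
                injection h2 with h3 h4
                subst h1; subst h3
                rw [hjbo] at hjb'
                cases hjb'
              · exact ⟨a', b', hm', hb', ia', jb', hia', hjb', hlt'⟩
          | some jb =>
            rw [hia]
            dsimp only
            by_cases hlt : (ia : Int) < n - 1 - (jb : Int)
            · rw [if_pos hlt]
              constructor
              · intro _
                exact ⟨a, b, List.mem_cons_self, hcb, ia, jb, hia, hjbo, hlt⟩
              · intro _; rfl
            · rw [if_neg hlt, ih]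
              constructor
              · rintro ⟨a', b', hm, h⟩
                exact ⟨a', b', List.mem_cons_of_mem _ hm, h⟩
              · rintro ⟨a', b', hm, hb', ia', jb', hia', hjb', hlt'⟩
                rcases List.mem_cons.mp hm with he | hm'
                · injection he with h1 h2
                  injection h2 with h3 h4
                  subst h1; subst h3
                  rw [hia] at hia'
                  rw [hjbo] at hjb'
                  cases hia'; cases hjb'
                  exact absurd hlt' hlt
                · exact ⟨a', b', hm', hb', ia', jb', hia', hjb', hlt'⟩
        · have hcond : (pages.contains a && pages.contains b) = false := by
            simp [hcb]
          rw [hcond]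
          simp only [Bool.false_eq_true, if_false]
          rw [ih]
          constructor
          · rintro ⟨a', b', hm, h⟩
            exact ⟨a', b', List.mem_cons_of_mem _ hm, h⟩
          · rintro ⟨a', b', hm, hb', ia', jb', hia', hjb', hlt'⟩
            rcases List.mem_cons.mp hm with he | hm'
            · injection he with h1 h2
              injection h2 with h3 h4
              subst h1; subst h3
              exact absurd hb' hcb
            · exact ⟨a', b', hm', hb', ia', jb', hia', hjb', hlt'⟩
      · have hcond : (pages.contains a && pages.contains b) = false := by
          simp [hca]
        rw [hcond]
        simp only [Bool.false_eq_true, if_false]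
        rw [ih]
        constructor
        · rintro ⟨a', b', hm, h⟩
          exact ⟨a', b', List.mem_cons_of_mem _ hm, h⟩
        · rintro ⟨a', b', hm, hb', ia', jb', hia', hjb', hlt'⟩
          rcases List.mem_cons.mp hm with he | hm'
          · injection he with h1 h2
            injection h2 with h3 h4
            subst h1; subst h3
            have hmem : a' ∈ pages := (PySem.List.index?_isSome_iff pages a').mp (by rw [hia']; rfl)
            exact absurd hmem hca
          · exact ⟨a', b', hm', hb', ia', jb', hia', hjb', hlt'⟩

theorem pairs_iff (pages : List Int) (a b : Int) :
    (∃ (i j : Nat), i < j ∧ pages[i]? = some a ∧ pages[j]? = some b) ↔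
      ∃ ia jb, PySem.List.index? pages a = some ia ∧
        PySem.List.index? pages.reverse b = some jb ∧
        (ia : Int) < (pages.length : Int) - 1 - (jb : Int) := by
  constructor
  · rintro ⟨i, j, hij, ha, hb⟩
    rw [List.getElem?_eq_some_iff] at ha hb
    obtain ⟨hi, ha⟩ := ha
    obtain ⟨hj, hb⟩ := hb
    have hma : a ∈ pages := ha ▸ List.getElem_mem hi
    obtain ⟨ia, hia⟩ := Option.isSome_iff_exists.mp
      ((PySem.List.index?_isSome_iff pages a).mpr hma)
    obtain ⟨hlia, haia, hmin⟩ := PySem.List.getElem_of_index?_eq_some hia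
    have h1 : ia ≤ i := by
      by_contra h
      exact hmin i (by omega) ha
    have hmb : b ∈ pages.reverse := List.mem_reverse.mpr (hb ▸ List.getElem_mem hj)
    obtain ⟨jb, hjb⟩ := Option.isSome_iff_exists.mp
      ((PySem.List.index?_isSome_iff pages.reverse b).mpr hmb)
    obtain ⟨hljb, hbjb, hminb⟩ := PySem.List.getElem_of_index?_eq_some hjb
    rw [List.length_reverse] at hljb
    have hrevj : pages.reverse[pages.length - 1 - j]'(by rw [List.length_reverse]; omega)
        = pages[j]'hj := by
      rw [List.getElem_reverse]
      congr 1
      omega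
    have h2 : jb ≤ pages.length - 1 - j := by
      by_contra h
      exact hminb (pages.length - 1 - j) (by omega) (by rw [hrevj, hb])
    refine ⟨ia, jb, hia, hjb, ?_⟩
    have hstep : ia < pages.length - 1 - jb := by omega
    omega
  · rintro ⟨ia, jb, hia, hjb, hlt⟩
    obtain ⟨hlia, haia, -⟩ := PySem.List.getElem_of_index?_eq_some hia
    obtain ⟨hljb, hbjb, -⟩ := PySem.List.getElem_of_index?_eq_some hjb
    have hljb' : jb < pages.length := by rw [List.length_reverse] at hljb; exact hljb
    have hrev : pages.reverse[jb]'hljb = pages[pages.length - 1 - jb]'(by omega) := by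
      rw [List.getElem_reverse]
    refine ⟨ia, pages.length - 1 - jb, by omega, ?_, ?_⟩
    · rw [List.getElem?_eq_some_iff]
      exact ⟨hlia, haia⟩
    · rw [List.getElem?_eq_some_iff]
      exact ⟨by omega, by rw [← hrev]; exact hbjb⟩

theorem B_false_iff (rules : List (Int × Int × Bool)) (pages : List Int)
    (hn : (rules.map (fun r => (r.1, r.2.1))).Nodup) :
    verify_order_alt rules pages = false ↔ pvBad rules pages := by
  unfold verify_order_alt pvBad
  rw [loopB_false_iff]
  constructor
  · rintro ⟨a, b, hm, hb, ia, jb, hia, hjb, hlt⟩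
    obtain ⟨i, j, hij, hpa, hpb⟩ := (pairs_iff pages a b).mpr ⟨ia, jb, hia, hjb, hlt⟩
    exact ⟨i, j, a, b, hij, hpa, hpb, mem_ruleGet? hn hm⟩
  · rintro ⟨i, j, a, b, hij, hpa, hpb, hr⟩
    have hm := ruleGet?_mem hr
    obtain ⟨ia, jb, hia, hjb, hlt⟩ := (pairs_iff pages a b).mp ⟨i, j, hij, hpa, hpb⟩
    have hbmem : b ∈ pages := by
      rw [List.getElem?_eq_some_iff] at hpb
      obtain ⟨h, rfl⟩ := hpb
      exact List.getElem_mem h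
    exact ⟨a, b, hm, hbmem, ia, jb, hia, hjb, hlt⟩

-- ===== VERDICT (by name: the statement is the Claim_ definition above) =====
theorem verify_order_spec : Claim_equal_verify_order := by
  intro rules pages _ hpre
  unfold Spec_verify_order
  have hA := A_false_iff rules pages
  have hB := B_false_iff rules pages hpre
  cases ha : verify_order rules pages <;> cases hb : verify_order_alt rules pages <;> simp_all
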